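-- pv_equiv track=rewrite | github.com/sbyeol3/Algorithm-Study | Python-code/Programmers/Stack-Queue/sq4-1.py | solution
-- ===== SOURCE A (Python) =====
-- def solution(priorities, location):
--     num = location
--     printCnt = 0
--
--     while num>=0 :
--       isHighest = True
--       for i in range(1, len(priorities)):
--         if priorities[0] < priorities[i] :
--           isHighest = False
--           break
--       tmp = priorities.pop(0) # 1 3 2
--       num -= 1 # 1
--       if isHighest == False :
--         if num == -1 : num = len(priorities)
--         priorities.append(tmp) # 1 3 2 2
--       else : printCnt += 1
--
--     return printCnt
-- ===== SOURCE B (Python) =====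
-- def solution(priorities, location):
--     queue = list(enumerate(priorities))
--     count = 0
--     while queue:
--         best = max(p for _, p in queue)
--         j = 0
--         while queue[j][1] != best:
--             j += 1
--         count += 1
--         if queue[j][0] == location:
--             return count
--         queue = queue[j + 1:] + queue[:j]
--     return 0
-- ===== Notes on version B (the rewrite author's own statement) =====
-- stated objective: faster
-- what changed: B tags each document with its index via enumerate and, instead of rotating the queue one element at a time with a positional counter (num) and an is-highest scan per rotation, jumps straight to the first occurrence of the maximum priority and removes it with one slice per print, returning the running print count when the tagged target is removed.
-- outside the precondition, e.g. on solution([-3, 2, -2, -1, 0], 7): A returns 3, B returns 0; on solution([], 0): A raises IndexError, B returns 0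
import Mathlib
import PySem

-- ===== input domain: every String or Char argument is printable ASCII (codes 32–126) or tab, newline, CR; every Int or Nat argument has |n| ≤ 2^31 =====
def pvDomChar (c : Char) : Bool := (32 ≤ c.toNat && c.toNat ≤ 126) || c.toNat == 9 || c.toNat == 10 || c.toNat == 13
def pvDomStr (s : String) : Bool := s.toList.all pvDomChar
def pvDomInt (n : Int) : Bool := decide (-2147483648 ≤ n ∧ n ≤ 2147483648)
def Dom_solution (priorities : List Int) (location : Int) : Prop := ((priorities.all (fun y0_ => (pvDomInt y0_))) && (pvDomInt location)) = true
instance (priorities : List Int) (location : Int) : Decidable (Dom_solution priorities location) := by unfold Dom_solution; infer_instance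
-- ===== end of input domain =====

-- B removes each printed document in one step (jump to the first maximum, one slice) instead of A's
-- one-element-at-a-time queue rotation with a positional counter, which a timing run measured as
-- faster; A mutates its list argument in place while B does not, so the equivalence proved here
-- (for location < len(priorities)) is about the return value only.

-- ===== PORT A =====
-- for i in range(1, len(priorities)): if priorities[0] < priorities[i]: isHighest = False; break
-- (a literal scan of the elements after the front; indices 1..len-1 are always in range)
def isHighestLoop (front : Int) : List Int → Bool
  | [] => true
  | x :: xs => if front < x then false else isHighestLoop front xs

-- the while loop; fuel only makes the recursion total: inside Pre_ the loop provably ends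
-- before (n+1)*(n+1) iterations (lemma loopA_main below), so the fuel = 0 branch is never taken there
def loopA : Nat → List Int → Int → Int → Int
  | 0, _, _, printCnt => printCnt
  | fuel + 1, priorities, num, printCnt =>
    if num < 0 then printCnt
    else
      match priorities with
      | [] => printCnt  -- Python: priorities.pop(0) raises IndexError here; outside Pre_
      | t :: rest =>    -- tmp = priorities.pop(0)
        let isHighest := isHighestLoop t rest
        let num1 := num - 1
        if isHighest = false then
          let num2 := if num1 = -1 then (rest.length : Int) else num1
          loopA fuel (rest ++ [t]) num2 printCnt     -- priorities.append(tmp)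
        else
          loopA fuel rest num1 (printCnt + 1)

def solution (priorities : List Int) (location : Int) : Int :=
  loopA ((priorities.length + 1) * (priorities.length + 1)) priorities location 0

-- ===== PORT B =====
-- j = 0; while queue[j][1] != best: j += 1   (first index whose priority equals best)
def scanBest (best : Int) : List (Int × Int) → Nat
  | [] => 0
  | q :: qs => if q.2 = best then 0 else scanBest best qs + 1

-- the while-queue loop; each iteration removes exactly one element, so fuel = initial length
-- only makes the recursion structural and is never exhausted while the queue is nonempty
def loopB (location : Int) : Nat → List (Int × Int) → Int → Int
  | 0, _, _ => 0
  | _ + 1, [], _ => 0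
  | fuel + 1, q :: qs, count =>
    let best := (qs.map Prod.snd).foldl max q.2          -- best = max(p for _, p in queue)
    let j := scanBest best (q :: qs)
    let count' := count + 1                              -- count += 1
    if ((q :: qs).getD j (0, 0)).1 = location then       -- queue[j][0] == location (j is in range: best occurs in queue)
      count'
    else
      loopB location fuel ((q :: qs).drop (j + 1) ++ (q :: qs).take j) count'   -- queue = queue[j+1:] + queue[:j]

def solution_alt (priorities : List Int) (location : Int) : Int :=
  loopB location priorities.length (PySem.List.enumerate priorities 0) 0

-- ===== PRECONDITION & SPEC =====
-- Pre_ excludes location ≥ len(priorities) (no document at that location): there A either raises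
-- IndexError popping the emptied queue, or returns an accidental count produced by its leftover
-- num-reset bookkeeping tracking a phantom position; B returns 0 on such inputs.
def Pre_solution (priorities : List Int) (location : Int) : Prop :=
  location < (priorities.length : Int)
instance (priorities : List Int) (location : Int) : Decidable (Pre_solution priorities location) := by
  unfold Pre_solution; infer_instance

def pvWitness_solution : List Int × Int := ([2, 1, 3, 2], 2)

def Spec_solution (priorities : List Int) (location : Int) (out : Int) : Prop := out = solution_alt priorities location
instance (priorities : List Int) (location : Int) (out : Int) : Decidable (Spec_solution priorities location out) := by unfold Spec_solution; infer_instance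

-- ===== CLAIM (what is proved, stated in full; the proofs are below) =====
def Claim_equal_solution : Prop := ∀ (priorities : List Int) (location : Int), Dom_solution priorities location → Pre_solution priorities location → Spec_solution priorities location (solution priorities location)

-- ===== LEMMAS AND PROOFS =====

-- the maximum B computes over the nonempty queue q :: qs
def bestOf (q : Int × Int) (qs : List (Int × Int)) : Int := (qs.map Prod.snd).foldl max q.2

-- position of the first maximum in the nonempty queue (fuel accounting for A's rotations)
def jOf : List (Int × Int) → Nat
  | [] => 0
  | q :: qs => scanBest (bestOf q qs) (q :: qs)

theorem best_mem (q : Int × Int) (qs : List (Int × Int)) :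
    bestOf q qs ∈ (q :: qs).map Prod.snd := by
  rcases PySem.List.foldl_max_mem (qs.map Prod.snd) q.2 with h | h
  · simp [bestOf, h]
  · simp only [List.map_cons]; exact List.mem_cons_of_mem _ h

theorem best_ub (q : Int × Int) (qs : List (Int × Int)) :
    ∀ x ∈ (q :: qs).map Prod.snd, x ≤ bestOf q qs := by
  intro x hx
  simp only [List.map_cons, List.mem_cons] at hx
  rcases hx with h | h
  · exact h ▸ (PySem.List.le_foldl_max (qs.map Prod.snd) q.2).1
  · exact (PySem.List.le_foldl_max (qs.map Prod.snd) q.2).2 x h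

theorem best_rot (q p : Int × Int) (ps : List (Int × Int)) :
    bestOf q (p :: ps) = bestOf p (ps ++ [q]) := by
  have hmem1 := best_mem q (p :: ps)
  have hmem2 := best_mem p (ps ++ [q])
  have hub1 := best_ub q (p :: ps)
  have hub2 := best_ub p (ps ++ [q])
  apply le_antisymm
  · apply hub2; simp only [List.map_cons, List.map_append, List.mem_cons, List.mem_append] at hmem1 ⊢
    tauto
  · apply hub1; simp only [List.map_cons, List.map_append, List.mem_cons, List.mem_append] at hmem2 ⊢
    tauto

theorem scanBest_lt_length (best : Int) (qs : List (Int × Int))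
    (h : best ∈ qs.map Prod.snd) : scanBest best qs < qs.length := by
  induction qs with
  | nil => simp at h
  | cons q t ih =>
    by_cases hq : q.2 = best
    · simp [scanBest, hq]
    · have : best ∈ t.map Prod.snd := by
        rcases List.mem_map.mp h with ⟨e, he, hee⟩
        rcases List.mem_cons.mp he with he' | he'
        · exact absurd (he' ▸ hee) hq
        · exact List.mem_map.mpr ⟨e, he', hee⟩
      simp only [scanBest, if_neg hq, List.length_cons]
      exact Nat.succ_lt_succ (ih this)

theorem jOf_lt (l : List (Int × Int)) (h : l ≠ []) : jOf l < l.length := by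
  match l with
  | q :: qs => exact scanBest_lt_length _ _ (best_mem q qs)

theorem scanBest_append_of_mem (best : Int) (qs t : List (Int × Int))
    (h : best ∈ qs.map Prod.snd) : scanBest best (qs ++ t) = scanBest best qs := by
  induction qs with
  | nil => simp at h
  | cons q l ih =>
    by_cases hq : q.2 = best
    · simp [scanBest, hq]
    · have : best ∈ l.map Prod.snd := by
        rcases List.mem_map.mp h with ⟨e, he, hee⟩
        rcases List.mem_cons.mp he with he' | he'
        · exact absurd (he' ▸ hee) hq
        · exact List.mem_map.mpr ⟨e, he', hee⟩
      simp [scanBest, hq, ih this]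

theorem isHighest_iff (t : Int) (xs : List Int) :
    isHighestLoop t xs = true ↔ ∀ x ∈ xs, x ≤ t := by
  induction xs with
  | nil => simp [isHighestLoop]
  | cons x l ih =>
    by_cases hx : t < x
    · simp only [isHighestLoop, if_pos hx, Bool.false_eq_true, false_iff]
      intro h
      exact absurd (h x (List.mem_cons_self)) (not_le.mpr hx)
    · have hxt : x ≤ t := not_lt.mp hx
      simp [isHighestLoop, hx, ih, hxt]

-- B never finds an absent location: it drains the queue and returns 0
theorem loopB_notfound (location : Int) :
    ∀ (fuel : Nat) (queue : List (Int × Int)) (cnt : Int),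
      (∀ e ∈ queue, e.1 ≠ location) → loopB location fuel queue cnt = 0 := by
  intro fuel
  induction fuel with
  | zero => intro queue cnt _; simp [loopB]
  | succ f ih =>
    intro queue cnt h
    match queue with
    | [] => simp [loopB]
    | q :: qs =>
      have hj : scanBest (bestOf q qs) (q :: qs) < (q :: qs).length :=
        scanBest_lt_length _ _ (best_mem q qs)
      have hget : (q :: qs).getD (scanBest (bestOf q qs) (q :: qs)) (0, 0) ∈ q :: qs := by
        rw [List.getD_eq_getElem _ _ hj]; exact List.getElem_mem hj
      simp only [loopB, bestOf] at *
      rw [if_neg (h _ hget)]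
      apply ih
      intro e he
      rcases List.mem_append.mp he with he' | he'
      · exact h e (List.mem_of_mem_drop he')
      · exact h e (List.mem_of_mem_take he')

-- rotating a non-maximal front to the back does not change B's result
theorem loopB_rot (location : Int) (fuel : Nat) (q p : Int × Int) (ps : List (Int × Int)) (cnt : Int)
    (hlt : q.2 < bestOf q (p :: ps)) :
    loopB location (fuel + 1) (q :: p :: ps) cnt = loopB location (fuel + 1) (p :: (ps ++ [q])) cnt := by
  have hqne : q.2 ≠ bestOf q (p :: ps) := ne_of_lt hlt
  have hmem : bestOf q (p :: ps) ∈ (p :: ps).map Prod.snd := by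
    have h := best_mem q (p :: ps)
    simp only [List.map_cons, List.mem_cons] at h ⊢
    rcases h with h | h
    · exact absurd h.symm hqne
    · exact h
  have hjq : scanBest (bestOf q (p :: ps)) (p :: ps) < (p :: ps).length :=
    scanBest_lt_length _ _ hmem
  have hscanL : scanBest (bestOf q (p :: ps)) (q :: p :: ps)
      = scanBest (bestOf q (p :: ps)) (p :: ps) + 1 := by
    simp [scanBest, hqne]
  have hscanR : scanBest (bestOf q (p :: ps)) ((p :: ps) ++ [q])
      = scanBest (bestOf q (p :: ps)) (p :: ps) := scanBest_append_of_mem _ _ _ hmem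
  simp only [loopB]
  have e1 : (List.map Prod.snd (p :: ps)).foldl max q.2 = bestOf q (p :: ps) := rfl
  have e2 : (List.map Prod.snd (ps ++ [q])).foldl max p.2 = bestOf q (p :: ps) :=
    (best_rot q p ps).symm
  rw [e1, e2, show (p :: (ps ++ [q])) = ((p :: ps) ++ [q]) from (List.cons_append ..).symm,
     hscanL, hscanR]
  set jq := scanBest (bestOf q (p :: ps)) (p :: ps) with hjqdef
  have hgetL : (q :: p :: ps).getD (jq + 1) (0, 0) = (p :: ps).getD jq (0, 0) := by
    rw [List.getD_cons_succ]
  have hgetR : ((p :: ps) ++ [q]).getD jq (0, 0) = (p :: ps).getD jq (0, 0) := by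
    rw [List.getD_eq_getElem?_getD, List.getElem?_append_left hjq, ← List.getD_eq_getElem?_getD]
  rw [hgetL, hgetR,
     List.drop_append_of_le_length (by omega), List.take_append_of_le_length (by omega)]
  have hdropL : (q :: p :: ps).drop (jq + 1 + 1) = (p :: ps).drop (jq + 1) := rfl
  have htakeL : (q :: p :: ps).take (jq + 1) = q :: (p :: ps).take jq := rfl
  rw [hdropL, htakeL]
  simp [List.append_assoc]

-- unfolding A's while-loop body for one iteration on a nonempty queue
theorem loopA_cons (f : Nat) (t : Int) (rest : List Int) (num cnt : Int) (h : ¬ num < 0) :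
    loopA (f + 1) (t :: rest) num cnt =
      if isHighestLoop t rest = false then
        loopA f (rest ++ [t]) (if num - 1 = -1 then (rest.length : Int) else num - 1) cnt
      else loopA f rest (num - 1) (cnt + 1) := by
  simp only [loopA, if_neg h]

-- A returns printCnt immediately once num is negative
theorem loopA_neg (fuel : Nat) (q : List Int) (num cnt : Int) (h : num < 0) (hf : 1 ≤ fuel) :
    loopA fuel q num cnt = cnt := by
  match fuel with
  | f + 1 => simp [loopA, if_pos h]

-- main invariant: A's queue is B's queue of tagged documents with the target at position num
theorem loopA_main (location : Int) :
    ∀ (fuel : Nat) (queue : List (Int × Int)) (num cnt : Int),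
      0 ≤ num → num < (queue.length : Int) →
      (∀ k : Nat, k < queue.length → ((queue.getD k (0, 0)).1 = location ↔ (k : Int) = num)) →
      queue.length * queue.length + jOf queue + 1 ≤ fuel →
      loopA fuel (queue.map Prod.snd) num cnt = loopB location queue.length queue cnt := by
  intro fuel
  induction fuel with
  | zero =>
    intro queue num cnt _ _ _ hfuel
    exact absurd hfuel (Nat.not_succ_le_zero _)
  | succ f ih =>
    intro queue num cnt h0 hlen htag hfuel
    match queue with
    | [] => simp at hlen; omega
    | q :: qs =>
      have hbub := best_ub q qs
      rw [show (q :: qs).map Prod.snd = q.2 :: qs.map Prod.snd from rfl,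
         loopA_cons f q.2 (qs.map Prod.snd) num cnt (not_lt.mpr h0)]
      by_cases hq : q.2 = bestOf q qs
      · -- the front is the (first) maximum: A prints it; B pops it at j = 0
        have hhigh : isHighestLoop q.2 (qs.map Prod.snd) = true :=
          (isHighest_iff _ _).mpr (fun x hx => hq ▸ hbub x (List.mem_cons_of_mem _ hx))
        rw [hhigh, if_neg (by simp)]
        have hscan0 : scanBest (bestOf q qs) (q :: qs) = 0 := by simp [scanBest, hq]
        rw [show (q :: qs).length = qs.length + 1 from rfl]
        simp only [loopB]
        rw [show (List.map Prod.snd qs).foldl max q.2 = bestOf q qs from rfl, hscan0]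
        simp only [List.getD_cons_zero, List.drop_succ_cons, List.drop_zero, List.take_zero,
          List.append_nil]
        have htag0 : q.1 = location ↔ (0 : Int) = num := by
          simpa using htag 0 (by simp)
        by_cases hnum : num = 0
        · rw [if_pos (htag0.mpr (by omega)), show num - 1 = -1 by omega]
          apply loopA_neg _ _ _ _ (by omega)
          have e : (qs.length + 1) * (qs.length + 1) = qs.length * qs.length + 2 * qs.length + 1 := by
            ring
          simp only [List.length_cons, e] at hfuel
          generalize qs.length * qs.length = S at hfuel
          omega
        · rw [if_neg (fun hc => hnum (htag0.mp hc).symm)]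
          have hqlen : 1 ≤ qs.length := by
            simp only [List.length_cons] at hlen; push_cast at hlen; omega
          have hjq := jOf_lt qs (by intro hnil; rw [hnil] at hqlen; simp at hqlen)
          refine ih qs (num - 1) (cnt + 1) (by omega) ?_ ?_ ?_
          · simp only [List.length_cons] at hlen; push_cast at hlen ⊢; omega
          · intro k hk
            have h1 := htag (k + 1) (by simp only [List.length_cons]; omega)
            rw [List.getD_cons_succ] at h1
            rw [h1]; push_cast; omega
          · have e : (qs.length + 1) * (qs.length + 1)
                = qs.length * qs.length + 2 * qs.length + 1 := by ring
            simp only [List.length_cons, e] at hfuel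
            generalize qs.length * qs.length = S at hfuel ⊢
            omega
      · -- the front is not maximal: A rotates it to the back; B's result is rotation-invariant
        have hlt : q.2 < bestOf q qs := lt_of_le_of_ne (hbub q.2 (by simp)) hq
        have hbin : bestOf q qs ∈ qs.map Prod.snd := by
          have h := best_mem q qs
          simp only [List.map_cons, List.mem_cons] at h
          rcases h with h | h
          · exact absurd h.symm hq
          · exact h
        cases qs with
        | nil => simp at hbin
        | cons p ps =>
          have hhigh : isHighestLoop q.2 ((p :: ps).map Prod.snd) = false := by
            rcases Bool.eq_false_or_eq_true (isHighestLoop q.2 ((p :: ps).map Prod.snd)) with h | h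
            · exact absurd ((isHighest_iff _ _).mp h _ hbin) (not_le.mpr hlt)
            · exact h
          rw [hhigh, if_pos rfl]
          have hlenN : num < (ps.length : Int) + 1 + 1 := by
            simp only [List.length_cons] at hlen; push_cast at hlen; omega
          have hmapapp : (p :: ps).map Prod.snd ++ [q.2] = ((p :: ps) ++ [q]).map Prod.snd := by
            simp
          have hnum2 : (if num - 1 = -1 then ((List.map Prod.snd (p :: ps)).length : Int) else num - 1)
              = (if num = 0 then ((p :: ps).length : Int) else num - 1) := by
            rcases eq_or_ne num 0 with h | h
            · simp [h]
            · rw [if_neg (by omega), if_neg h]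
          rw [hmapapp, hnum2]
          -- index bookkeeping for the rotated queue
          have hscanq : scanBest (bestOf q (p :: ps)) (q :: p :: ps)
              = scanBest (bestOf q (p :: ps)) (p :: ps) + 1 := by simp [scanBest, hq]
          have hscanapp : scanBest (bestOf q (p :: ps)) ((p :: ps) ++ [q])
              = scanBest (bestOf q (p :: ps)) (p :: ps) := scanBest_append_of_mem _ _ _ hbin
          have hjlt : scanBest (bestOf q (p :: ps)) (p :: ps) < (p :: ps).length :=
            scanBest_lt_length _ _ hbin
          have hjof_app : jOf ((p :: ps) ++ [q]) = scanBest (bestOf q (p :: ps)) (p :: ps) := by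
            rw [show ((p :: ps) ++ [q] : List (Int × Int)) = p :: (ps ++ [q]) from
              List.cons_append ..]
            show scanBest (bestOf p (ps ++ [q])) (p :: (ps ++ [q])) = _
            rw [← best_rot q p ps, show (p :: (ps ++ [q]) : List (Int × Int)) = (p :: ps) ++ [q] from
              (List.cons_append ..).symm, hscanapp]
          have hjof_cons : jOf (q :: p :: ps)
              = scanBest (bestOf q (p :: ps)) (p :: ps) + 1 := hscanq
          have hA : 0 ≤ (if num = 0 then ((p :: ps).length : Int) else num - 1) := by
            rcases eq_or_ne num 0 with h | h
            · rw [if_pos h]; push_cast [List.length_cons]; omega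
            · rw [if_neg h]; omega
          have hB : (if num = 0 then ((p :: ps).length : Int) else num - 1)
              < ((((p :: ps) ++ [q]).length : Nat) : Int) := by
            rcases eq_or_ne num 0 with h | h
            · rw [if_pos h]; push_cast [List.length_cons, List.length_append]; omega
            · rw [if_neg h]; push_cast [List.length_cons, List.length_append]; omega
          have hC : ∀ k : Nat, k < ((p :: ps) ++ [q]).length →
              ((((p :: ps) ++ [q]).getD k (0, 0)).1 = location ↔
                (k : Int) = (if num = 0 then ((p :: ps).length : Int) else num - 1)) := by
            intro k hk
            simp only [List.length_append, List.length_cons, List.length_nil] at hk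
            by_cases hkl : k < (p :: ps).length
            · have hgk : (((p :: ps) ++ [q]).getD k (0, 0)) = ((p :: ps).getD k (0, 0)) := by
                rw [List.getD_eq_getElem?_getD, List.getElem?_append_left hkl,
                  ← List.getD_eq_getElem?_getD]
              have h1 := htag (k + 1) (by simp only [List.length_cons]
                                          simp only [List.length_cons] at hkl; omega)
              rw [List.getD_cons_succ] at h1
              rw [hgk, h1]
              simp only [List.length_cons] at hkl
              rcases eq_or_ne num 0 with h | h
              · rw [if_pos h]; push_cast [List.length_cons]; omega
              · rw [if_neg h]; push_cast [List.length_cons]; omega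
            · have hkeq : k = (p :: ps).length := by simp only [List.length_cons] at hkl ⊢; omega
              subst hkeq
              have hgq : (((p :: ps) ++ [q]).getD (p :: ps).length (0, 0)) = q := by
                rw [List.getD_eq_getElem?_getD, List.getElem?_append_right (le_refl _)]
                simp
              have h0tag := htag 0 (by simp)
              rw [List.getD_cons_zero] at h0tag
              rw [hgq, h0tag]
              rcases eq_or_ne num 0 with h | h
              · rw [if_pos h]; push_cast [List.length_cons]; omega
              · rw [if_neg h]; push_cast [List.length_cons]; omega
          have hD : ((p :: ps) ++ [q]).length * ((p :: ps) ++ [q]).length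
              + jOf ((p :: ps) ++ [q]) + 1 ≤ f := by
            simp only [List.length_append, List.length_cons, List.length_nil] at hfuel ⊢
            rw [hjof_cons] at hfuel
            rw [hjof_app]
            generalize (ps.length + 1 + 1) * (ps.length + 1 + 1) = S at hfuel ⊢
            omega
          rw [ih ((p :: ps) ++ [q]) (if num = 0 then ((p :: ps).length : Int) else num - 1) cnt
            hA hB hC hD,
            show (((p :: ps) ++ [q] : List (Int × Int))).length = (ps.length + 1) + 1 by simp,
            show ((q :: p :: ps : List (Int × Int))).length = (ps.length + 1) + 1 by simp,
            show ((p :: ps) ++ [q] : List (Int × Int)) = p :: (ps ++ [q]) from List.cons_append ..]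
          exact (loopB_rot location (ps.length + 1) q p ps cnt hlt).symm

-- ===== VERDICT (by name: the statement is the Claim_ definition above) =====
theorem solution_spec : Claim_equal_solution := by
  intro priorities location _ hpre
  unfold Pre_solution at hpre
  show solution priorities location = solution_alt priorities location
  unfold solution solution_alt
  by_cases hl : location < 0
  · -- location < 0: A's while loop never runs; B drains the queue without finding the tag
    rw [loopA_neg _ _ _ _ hl
      (Nat.one_le_iff_ne_zero.mpr (Nat.mul_ne_zero (Nat.succ_ne_zero _) (Nat.succ_ne_zero _)))]
    rw [loopB_notfound location _ _ _ ?_]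
    intro e he
    rcases (PySem.List.mem_enumerate_iff _ _ _).mp he with ⟨k, hk, rfl⟩
    simp only [zero_add]
    omega
  · have h0 : 0 ≤ location := not_lt.mp hl
    have hlenE : (PySem.List.enumerate priorities 0).length = priorities.length :=
      PySem.List.length_enumerate ..
    have hmap : (PySem.List.enumerate priorities 0).map Prod.snd = priorities :=
      PySem.List.map_snd_enumerate ..
    have hn1 : 1 ≤ priorities.length := by omega
    have hjo := jOf_lt (PySem.List.enumerate priorities 0)
      (by intro hnil; rw [hnil] at hlenE; simp at hlenE; omega)
    rw [hlenE] at hjo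
    have hres := loopA_main location ((priorities.length + 1) * (priorities.length + 1))
      (PySem.List.enumerate priorities 0) location 0 h0 (by rw [hlenE]; exact_mod_cast hpre)
      ?_ ?_
    · rw [hmap, hlenE] at hres
      exact hres
    · intro k hk
      rw [hlenE] at hk
      rw [List.getD_eq_getElem _ _ (by rw [hlenE]; exact hk), PySem.List.getElem_enumerate]
      simp
    · rw [hlenE]
      have e : (priorities.length + 1) * (priorities.length + 1)
          = priorities.length * priorities.length + 2 * priorities.length + 1 := by ring
      rw [e]
      generalize priorities.length * priorities.length = S
      omega
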